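-- pv_equiv track=rewrite | github.com/indiaprince/Algorithms | secretmap_programmers.py | solution
-- ===== SOURCE A (Python) =====
-- def solution(n, arr1, arr2):
--     answer = []
--     map1= [[] for i in range(n)]
--     map2= [[] for i in range(n)]
--     for i in range(n):
--         t1 = ''
--         t2= ''
--         for j in range(n):
--             if(arr1[i]%2==0): t1+='0'
--             else : t1+='1'
--             arr1[i]=arr1[i]//2
--             if(arr2[i]%2==0): t2+='0'
--             else : t2+='1'
--             arr2[i]=arr2[i]//2
--         map1[i]=t1
--         map2[i]=t2
--     for i in range(n):
--         tmp = ''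
--         for j in range(n):
--             if(map1[i][j]=='1' or map2[i][j]=='1'): tmp+='#'
--             if(map1[i][j]=='0' and map2[i][j]=='0') :tmp+=' '
--         tmp = tmp[::-1]
--         answer.append(tmp)
--     return answer
-- ===== SOURCE B (Python) =====
-- def solution(n, arr1, arr2):
--     # Reads the OR of the two bit patterns directly with shifts; no intermediate
--     # '0'/'1' string tables and no in-place mutation of arr1/arr2 (return value only).
--     answer = []
--     for i in range(n):
--         a, b = arr1[i], arr2[i]
--         answer.append(''.join('#' if ((a >> (n - 1 - j)) & 1) or ((b >> (n - 1 - j)) & 1) else ' '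
--                               for j in range(n)))
--     return answer
-- ===== Notes on version B (the rewrite author's own statement) =====
-- stated objective: simpler
-- what changed: B drops A's intermediate '0'/'1' string tables and iterative destructive halving: it reads each bit of arr1[i] and arr2[i] directly with a shift-and-mask at the MSB-first position, building each row in one comprehension with no second pass and no reversal; A mutates arr1/arr2 in place while B does not (return-value equivalence only).
import Mathlib
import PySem

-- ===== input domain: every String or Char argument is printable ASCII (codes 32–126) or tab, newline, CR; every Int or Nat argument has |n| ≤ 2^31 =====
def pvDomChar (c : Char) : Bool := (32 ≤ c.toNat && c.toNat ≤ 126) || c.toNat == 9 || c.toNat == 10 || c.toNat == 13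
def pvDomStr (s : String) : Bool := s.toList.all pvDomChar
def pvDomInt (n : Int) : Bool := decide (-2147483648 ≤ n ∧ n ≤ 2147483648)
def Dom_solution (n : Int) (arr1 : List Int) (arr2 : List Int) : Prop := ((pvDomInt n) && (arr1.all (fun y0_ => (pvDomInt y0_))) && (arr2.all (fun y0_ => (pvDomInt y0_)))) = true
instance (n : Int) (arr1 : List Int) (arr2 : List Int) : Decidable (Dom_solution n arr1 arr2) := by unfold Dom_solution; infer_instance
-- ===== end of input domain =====

-- B renders each row by testing the bits of arr1[i] and arr2[i] directly with shifts (MSB first),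
-- dropping A's '0'/'1' string tables, the destructive halving and the final reversal; A mutates
-- arr1/arr2 in place and B does not — the equivalence proved is about the return value only.

-- ===== PORT A =====
-- inner loop body of A's first pass: state = (arr1[i], arr2[i], t1, t2)
def solutionStep (st : Int × Int × List Char × List Char) : Int × Int × List Char × List Char :=
  let t1 := st.2.2.1 ++ [if PySem.Int.mod st.1 2 = 0 then '0' else '1']
  let a := PySem.Int.floordiv st.1 2
  let t2 := st.2.2.2 ++ [if PySem.Int.mod st.2.1 2 = 0 then '0' else '1']
  let b := PySem.Int.floordiv st.2.1 2
  (a, b, t1, t2)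

-- first pass for one row: 'for j in range(n): …' over the state above
def solutionBits (n a b : Int) : Int × Int × List Char × List Char :=
  (PySem.List.pyRange 0 n 1).foldl (fun st _ => solutionStep st) (a, b, [], [])

def solution (n : Int) (arr1 : List Int) (arr2 : List Int) : List String :=
  -- first pass: map1[i], map2[i] (kept as one list of pairs)
  let maps := (PySem.List.pyRange 0 n 1).map (fun i =>
      (solutionBits n (PySem.List.pyGetD arr1 i 0) (PySem.List.pyGetD arr2 i 0)).2.2)
  -- second pass
  (PySem.List.pyRange 0 n 1).map (fun i =>
    let m := PySem.List.pyGetD maps i ([], [])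
    let tmp := (PySem.List.pyRange 0 n 1).foldl (fun tmp j =>
      let c1 := PySem.List.pyGetD m.1 j ' '
      let c2 := PySem.List.pyGetD m.2 j ' '
      let tmp := tmp ++ (if c1 = '1' ∨ c2 = '1' then ['#'] else [])
      tmp ++ (if c1 = '0' ∧ c2 = '0' then [' '] else [])) []
    String.mk tmp.reverse)

-- ===== PORT B =====
def solution_alt (n : Int) (arr1 : List Int) (arr2 : List Int) : List String :=
  (PySem.List.pyRange 0 n 1).map (fun i =>
    let a := PySem.List.pyGetD arr1 i 0
    let b := PySem.List.pyGetD arr2 i 0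
    String.mk ((PySem.List.pyRange 0 n 1).map (fun j =>
      if PySem.Int.mod (PySem.Int.floordiv a (2 ^ (n - 1 - j).toNat)) 2 = 1 ∨
         PySem.Int.mod (PySem.Int.floordiv b (2 ^ (n - 1 - j).toNat)) 2 = 1
      then '#' else ' ')))

-- ===== PRECONDITION & SPEC =====
-- Pre_ excludes exactly the inputs where Python A raises IndexError: n larger than a list's length.
def Pre_solution (n : Int) (arr1 : List Int) (arr2 : List Int) : Prop :=
  n ≤ (arr1.length : Int) ∧ n ≤ (arr2.length : Int)
instance (n : Int) (arr1 : List Int) (arr2 : List Int) : Decidable (Pre_solution n arr1 arr2) := by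
  unfold Pre_solution; infer_instance
def pvWitness_solution : Int × List Int × List Int := (2, [1, 2], [2, 3])

def Spec_solution (n : Int) (arr1 : List Int) (arr2 : List Int) (out : List String) : Prop := out = solution_alt n arr1 arr2
instance (n : Int) (arr1 : List Int) (arr2 : List Int) (out : List String) : Decidable (Spec_solution n arr1 arr2 out) := by unfold Spec_solution; infer_instance

-- ===== CLAIM (what is proved, stated in full; the proofs are below) =====
def Claim_equal_solution : Prop := ∀ (n : Int) (arr1 : List Int) (arr2 : List Int), Dom_solution n arr1 arr2 → Pre_solution n arr1 arr2 → Spec_solution n arr1 arr2 (solution n arr1 arr2)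

-- ===== LEMMAS AND PROOFS =====

-- bit k of x (Python: (x >> k) & 1, via floor division)
def pvBit (x : Int) (k : Nat) : Int := PySem.Int.mod (PySem.Int.floordiv x (2 ^ k)) 2
def pvBitc (x : Int) (k : Nat) : Char := if pvBit x k = 0 then '0' else '1'

lemma pv_foldl_const {α β : Type} (g : β → β) :
    ∀ (l : List α) (s : β), l.foldl (fun s _ => g s) s = g^[l.length] s := by
  intro l
  induction l with
  | nil => intro s; rfl
  | cons x xs ih => intro s; simp [List.foldl_cons, ih, Function.iterate_succ_apply]

lemma pv_bit_mem (x : Int) (k : Nat) : pvBit x k = 0 ∨ pvBit x k = 1 := by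
  unfold pvBit
  rw [PySem.Int.mod_eq_emod_of_pos (by norm_num : (0:Int) < 2)]
  omega

lemma pv_fd_succ (x : Int) (k : Nat) :
    PySem.Int.floordiv (PySem.Int.floordiv x (2 ^ k)) 2 = PySem.Int.floordiv x (2 ^ (k + 1)) := by
  rw [PySem.Int.floordiv_eq_ediv_of_pos (by positivity : (0:Int) < 2 ^ k),
      PySem.Int.floordiv_eq_ediv_of_pos (by norm_num : (0:Int) < 2),
      PySem.Int.floordiv_eq_ediv_of_pos (by positivity : (0:Int) < 2 ^ (k + 1)),
      Int.ediv_ediv_of_nonneg (by positivity : (0:Int) ≤ 2 ^ k), pow_succ]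

lemma pv_iterate_step (a b : Int) :
    ∀ N : Nat, solutionStep^[N] (a, b, [], []) =
      (PySem.Int.floordiv a (2 ^ N), PySem.Int.floordiv b (2 ^ N),
       (List.range N).map (pvBitc a), (List.range N).map (pvBitc b)) := by
  intro N
  induction N with
  | zero => simp [PySem.Int.floordiv_eq_ediv_of_pos]
  | succ N ih =>
      rw [Function.iterate_succ_apply', ih]
      simp only [solutionStep, List.range_succ, List.map_append, List.map_cons, List.map_nil]
      refine Prod.ext (by simpa using pv_fd_succ a N) (Prod.ext (by simpa using pv_fd_succ b N) ?_)
      simp [pvBitc, pvBit]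

lemma pv_bits_eq (n a b : Int) :
    solutionBits n a b =
      (PySem.Int.floordiv a (2 ^ n.toNat), PySem.Int.floordiv b (2 ^ n.toNat),
       (List.range n.toNat).map (pvBitc a), (List.range n.toNat).map (pvBitc b)) := by
  unfold solutionBits
  rw [pv_foldl_const, PySem.List.length_pyRange_one, pv_iterate_step]
  norm_num

lemma pv_body_singleton (a b : Int) (k : Nat) :
    ((if pvBitc a k = '1' ∨ pvBitc b k = '1' then ['#'] else []) ++
     (if pvBitc a k = '0' ∧ pvBitc b k = '0' then [' '] else []))
    = [if pvBit a k = 1 ∨ pvBit b k = 1 then '#' else ' '] := by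
  rcases pv_bit_mem a k with h1 | h1 <;> rcases pv_bit_mem b k with h2 | h2 <;>
    simp [pvBitc, h1, h2]

lemma pv_rev_map_range {α : Type} (f : Nat → α) (N : Nat) :
    ((List.range N).map f).reverse = (List.range N).map (fun k => f (N - 1 - k)) := by
  apply List.ext_getElem
  · simp
  · intro i h1 h2
    simp only [List.length_reverse, List.length_map, List.length_range] at h1 h2
    rw [List.getElem_reverse]
    simp only [List.getElem_map, List.getElem_range, List.length_map, List.length_range]

-- the character A's second loop reads out at a valid index
lemma pv_getD_bits (x : Int) (n j : Int) (h0 : 0 ≤ j) (hj : j < n) :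
    PySem.List.pyGetD ((List.range n.toNat).map (pvBitc x)) j ' ' = pvBitc x j.toNat := by
  rw [PySem.List.pyGetD_eq_getElem _ ' ' h0
        (by simp only [List.length_map, List.length_range]; omega)]
  simp

-- the row A produces for entries a, b equals the row B produces
lemma pv_row_eq (n a b : Int) :
    ((PySem.List.pyRange 0 n 1).foldl (fun tmp j =>
        (tmp ++ (if PySem.List.pyGetD ((List.range n.toNat).map (pvBitc a)) j ' ' = '1' ∨
                    PySem.List.pyGetD ((List.range n.toNat).map (pvBitc b)) j ' ' = '1'
                 then ['#'] else [])) ++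
        (if PySem.List.pyGetD ((List.range n.toNat).map (pvBitc a)) j ' ' = '0' ∧
            PySem.List.pyGetD ((List.range n.toNat).map (pvBitc b)) j ' ' = '0'
         then [' '] else [])) []).reverse
    = (PySem.List.pyRange 0 n 1).map (fun j =>
        if pvBit a (n - 1 - j).toNat = 1 ∨ pvBit b (n - 1 - j).toNat = 1 then '#' else ' ') := by
  have hfold : ∀ (ks : List Int) (tmp : List Char), (∀ j ∈ ks, 0 ≤ j ∧ j < n) →
      ks.foldl (fun tmp j =>
        (tmp ++ (if PySem.List.pyGetD ((List.range n.toNat).map (pvBitc a)) j ' ' = '1' ∨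
                    PySem.List.pyGetD ((List.range n.toNat).map (pvBitc b)) j ' ' = '1'
                 then ['#'] else [])) ++
        (if PySem.List.pyGetD ((List.range n.toNat).map (pvBitc a)) j ' ' = '0' ∧
            PySem.List.pyGetD ((List.range n.toNat).map (pvBitc b)) j ' ' = '0'
         then [' '] else [])) tmp
      = tmp ++ ks.map (fun j => if pvBit a j.toNat = 1 ∨ pvBit b j.toNat = 1 then '#' else ' ') := by
    intro ks
    induction ks with
    | nil => intro tmp _; simp
    | cons j ks ih =>
        intro tmp hmem
        obtain ⟨h0, hj⟩ := hmem j (by simp)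
        rw [List.foldl_cons, pv_getD_bits a n j h0 hj, pv_getD_bits b n j h0 hj,
            List.append_assoc, pv_body_singleton,
            ih _ (fun x hx => hmem x (by simp [hx]))]
        simp
  rw [hfold _ [] (by intro j hj; exact PySem.List.mem_pyRange_one.mp hj), List.nil_append]
  rw [PySem.List.pyRange_one]
  simp only [List.map_map, Function.comp_def, sub_zero, zero_add]
  rw [pv_rev_map_range]
  apply List.map_congr_left
  intro k hk
  have hk' : k < n.toNat := List.mem_range.mp hk
  have h2 : ((n : Int) - 1 - (k : Int)).toNat = n.toNat - 1 - k := by omega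
  simp [h2]

lemma pv_solution_eq (n : Int) (arr1 arr2 : List Int) :
    solution n arr1 arr2 = solution_alt n arr1 arr2 := by
  unfold solution solution_alt
  apply List.map_congr_left
  intro i hi
  have hmem := PySem.List.mem_pyRange_one.mp hi
  have hm : PySem.List.pyGetD ((PySem.List.pyRange 0 n 1).map (fun i =>
      (solutionBits n (PySem.List.pyGetD arr1 i 0) (PySem.List.pyGetD arr2 i 0)).2.2)) i ([], [])
      = (solutionBits n (PySem.List.pyGetD arr1 i 0) (PySem.List.pyGetD arr2 i 0)).2.2 :=
    PySem.List.pyGetD_map_pyRange_of_nonneg _ n i _ hmem.1 hmem.2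
  simp only [hm]
  simp only [pv_bits_eq]
  exact congrArg String.mk (pv_row_eq n (PySem.List.pyGetD arr1 i 0) (PySem.List.pyGetD arr2 i 0))

-- ===== VERDICT (by name: the statement is the Claim_ definition above) =====
theorem solution_spec : Claim_equal_solution := by
  intro n arr1 arr2 _ _
  unfold Spec_solution
  exact pv_solution_eq n arr1 arr2
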